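-- pv_equiv track=rewrite | github.com/pgfoster/p4-phylogenetics | p4/func.py | getSplitStringFromKey
-- ===== SOURCE A (Python) =====
-- def getSplitStringFromKey(theKey, nTax, escaped=False):
--     """Convert a long int binary split key to dot-star notation."""
--
--     ss = ['.'] * nTax
--     #ss = ['0'] * nTax
--     for i in range(nTax):
--         tester = 2 ** i
--         if tester & theKey:
--             ss[i] = '*'
--             #ss[i] = '1'
--     if escaped:
--         return '\\' + '\\'.join(ss)
--     else:
--         return ''.join(ss)
-- ===== SOURCE B (Python) =====
-- def getSplitStringFromKey(theKey, nTax, escaped=False):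
--     """Convert a long int binary split key to dot-star notation."""
--     if nTax <= 0:
--         s = ''
--     else:
--         bits = format(theKey & ((1 << nTax) - 1), 'b').zfill(nTax)
--         s = bits[::-1].translate(str.maketrans('01', '.*'))
--     if escaped:
--         return '\\' + '\\'.join(s)
--     else:
--         return s
-- ===== Notes on version B (the rewrite author's own statement) =====
-- stated objective: idiomatic
-- what changed: Replaces the per-bit loop (2**i & theKey with in-place list assignment) by a single binary-string conversion of the masked key (format + zfill), reversed and mapped through a '01'->'.'*' character translation.
import Mathlib
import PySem

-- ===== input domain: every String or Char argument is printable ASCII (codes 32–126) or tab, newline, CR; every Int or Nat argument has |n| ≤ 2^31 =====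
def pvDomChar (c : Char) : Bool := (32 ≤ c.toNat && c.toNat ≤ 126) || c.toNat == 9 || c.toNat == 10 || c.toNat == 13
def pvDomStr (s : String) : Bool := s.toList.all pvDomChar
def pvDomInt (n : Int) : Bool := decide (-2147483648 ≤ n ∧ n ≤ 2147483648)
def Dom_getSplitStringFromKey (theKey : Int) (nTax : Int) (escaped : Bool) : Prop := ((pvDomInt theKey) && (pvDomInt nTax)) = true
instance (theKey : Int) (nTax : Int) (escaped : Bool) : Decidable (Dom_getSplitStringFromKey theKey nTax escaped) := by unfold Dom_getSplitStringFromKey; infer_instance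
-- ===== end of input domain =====

-- B replaces A's bit-by-bit loop (2**i & theKey with list mutation) by one binary-string
-- conversion of the masked key, reversed and character-translated (objective: idiomatic).

-- ===== PORT A =====
-- Python list of one-character strings is modeled as List Char; ''.join / '\\'.join over it
-- is PySem.Chars.join over the singleton lists, exact.
def getSplitStringFromKey (theKey : Int) (nTax : Int) (escaped : Bool) : String :=
  let ss : List Char := List.replicate nTax.toNat '.'      -- ['.'] * nTax
  let ss := (PySem.List.pyRange 0 nTax 1).foldl            -- for i in range(nTax)
      (fun ss i =>                                          -- tester = 2 ** i (i ≥ 0 in range, so ^ i.toNat is exact)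
        if PySem.Int.band ((2:Int) ^ i.toNat) theKey ≠ 0   -- if tester & theKey:
        then ss.set i.toNat '*' else ss) ss                -- ss[i] = '*'
  if escaped then String.mk ('\\' :: PySem.Chars.join ['\\'] (ss.map (fun c => [c])))
  else String.mk (PySem.Chars.join [] (ss.map (fun c => [c])))

-- ===== PORT B =====
-- str.translate with maketrans('01', '.*'): maps '0'→'.', '1'→'*', leaves other chars (exact)
def pvTr (c : Char) : Char := if c = '0' then '.' else if c = '1' then '*' else c

def getSplitStringFromKey_alt (theKey : Int) (nTax : Int) (escaped : Bool) : String :=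
  let s : List Char :=
    if nTax ≤ 0 then []
    else
      -- format(theKey & ((1 << nTax) - 1), 'b').zfill(nTax)  (nTax > 0 here, so <<< nTax.toNat is exact)
      let bits := PySem.Chars.zfill
        (PySem.Int.toBinChars (PySem.Int.band theKey (((1:Int) <<< nTax.toNat) - 1))) nTax
      (bits.reverse).map pvTr                               -- bits[::-1].translate(...)  ([::-1] is reverse)
  if escaped then String.mk ('\\' :: PySem.Chars.join ['\\'] (s.map (fun c => [c])))
  else String.mk (PySem.Chars.join [] (s.map (fun c => [c])))

-- ===== PRECONDITION & SPEC =====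
def Spec_getSplitStringFromKey (theKey : Int) (nTax : Int) (escaped : Bool) (out : String) : Prop := out = getSplitStringFromKey_alt theKey nTax escaped
instance (theKey : Int) (nTax : Int) (escaped : Bool) (out : String) : Decidable (Spec_getSplitStringFromKey theKey nTax escaped out) := by unfold Spec_getSplitStringFromKey; infer_instance

-- ===== CLAIM (what is proved, stated in full; the proofs are below) =====
def Claim_equal_getSplitStringFromKey : Prop := ∀ (theKey : Int) (nTax : Int) (escaped : Bool), Dom_getSplitStringFromKey theKey nTax escaped → Spec_getSplitStringFromKey theKey nTax escaped (getSplitStringFromKey theKey nTax escaped)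

-- ===== LEMMAS AND PROOFS =====

-- LSB-first binary digit characters of a natural number
def bitsLSB (k : Nat) : List Char :=
  if h : k < 2 then [Nat.digitChar k]
  else Nat.digitChar (k % 2) :: bitsLSB (k / 2)
decreasing_by omega

lemma bitsLSB_ne_nil (k : Nat) : bitsLSB k ≠ [] := by
  unfold bitsLSB; split <;> simp

lemma bitsLSB_mem (k : Nat) : ∀ c ∈ bitsLSB k, c = '0' ∨ c = '1' := by
  induction k using Nat.strong_induction_on with
  | _ k ih =>
    unfold bitsLSB
    split
    · next h2 => intro c hc; interval_cases k <;> simp_all <;> decide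
    · next h2 =>
      intro c hc
      rcases List.mem_cons.mp hc with h | h
      · subst h
        rcases Nat.mod_two_eq_zero_or_one k with h | h <;> rw [h] <;> simp [Nat.digitChar]
      · exact ih (k / 2) (by omega) c h

lemma toDigitsCore_two (f : Nat) : ∀ (k : Nat) (acc : List Char), k < f →
    Nat.toDigitsCore 2 f k acc = (bitsLSB k).reverse ++ acc := by
  induction f with
  | zero => omega
  | succ f ih =>
    intro k acc hk
    rw [show Nat.toDigitsCore 2 (f + 1) k acc =
        if k / 2 = 0 then Nat.digitChar (k % 2) :: acc
        else Nat.toDigitsCore 2 f (k / 2) (Nat.digitChar (k % 2) :: acc) from by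
      simp [Nat.toDigitsCore]]
    by_cases h2 : k < 2
    · have hdiv : k / 2 = 0 := by omega
      have hmod : k % 2 = k := by omega
      rw [if_pos hdiv, hmod]
      unfold bitsLSB
      rw [dif_pos h2]
      simp
    · have hdiv : ¬ (k / 2 = 0) := by omega
      rw [if_neg hdiv, ih (k / 2) _ (by omega)]
      conv_rhs => rw [bitsLSB, dif_neg h2]
      simp

lemma toDigits_two (k : Nat) : Nat.toDigits 2 k = (bitsLSB k).reverse := by
  unfold Nat.toDigits
  rw [toDigitsCore_two _ _ _ (by omega)]
  simp

lemma compl_testBit : ∀ (j n m : Nat), m < 2 ^ n → j < n →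
    (2 ^ n - 1 - m).testBit j = !(m.testBit j) := by
  intro j
  induction j with
  | zero =>
    intro n m hm hj
    have hn : 2 ^ n = 2 * 2 ^ (n - 1) := by
      rw [← pow_succ']; congr 1; omega
    simp only [Nat.testBit_zero]
    rcases Nat.mod_two_eq_zero_or_one m with h | h <;> simp [h] <;> omega
  | succ j ih =>
    intro n m hm hj
    have hn : 2 ^ n = 2 * 2 ^ (n - 1) := by
      rw [← pow_succ']; congr 1; omega
    rw [Nat.testBit_add_one, Nat.testBit_add_one]
    have h1 : (2 ^ n - 1 - m) / 2 = 2 ^ (n - 1) - 1 - m / 2 := by omega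
    rw [h1]
    exact ih (n - 1) (m / 2) (by omega) (by omega)

lemma bits_pad : ∀ (n k : Nat), 0 < n → k < 2 ^ n →
    (bitsLSB k ++ List.replicate (n - (bitsLSB k).length) '0').map pvTr
      = List.ofFn (fun i : Fin n => if k.testBit i then '*' else '.') := by
  intro n
  induction n with
  | zero => omega
  | succ n ih =>
    intro k hn hk
    by_cases h2 : k < 2
    · rw [show bitsLSB k = [Nat.digitChar k] from by rw [bitsLSB, dif_pos h2]]
      rw [List.ofFn_succ]
      interval_cases k <;>
        simp [pvTr, Nat.digitChar, List.map_replicate, Nat.zero_testBit,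
              Nat.testBit_add_one, List.ofFn_const]
    · rw [show bitsLSB k = Nat.digitChar (k % 2) :: bitsLSB (k / 2) from by
        rw [bitsLSB, dif_neg h2]]
      have hn' : 0 < n := by
        rcases Nat.eq_zero_or_pos n with h | h
        · subst h; simp at hk; omega
        · exact h
      have hk' : k / 2 < 2 ^ n := by
        have : 2 ^ (n + 1) = 2 * 2 ^ n := by ring
        omega
      simp only [List.cons_append, List.map_cons, List.length_cons]
      rw [List.ofFn_succ]
      congr 1
      · rcases Nat.mod_two_eq_zero_or_one k with h | h <;>
          simp [h, pvTr, Nat.testBit_zero, Nat.digitChar]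
      · have hlen : n + 1 - ((bitsLSB (k / 2)).length + 1) = n - (bitsLSB (k / 2)).length := by
          omega
        rw [hlen, ih (k / 2) hn' hk']
        exact congrArg List.ofFn (funext fun i => by
          simp [Fin.val_succ, Nat.testBit_add_one])

lemma zfill_no_sign (c : Char) (rest : List Char) (w : Int) (h0 : c ≠ '+') (h1 : c ≠ '-') :
    PySem.Chars.zfill (c :: rest) w
      = List.replicate (w.toNat - (c :: rest).length) '0' ++ (c :: rest) := by
  unfold PySem.Chars.zfill
  split
  · next hle =>
    have hle' : w.toNat ≤ (c :: rest).length := Int.toNat_le.mpr hle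
    rw [Nat.sub_eq_zero_of_le hle']
    simp
  · simp [h0, h1]

lemma band_mask_nonneg (x : Int) (n : Nat) : 0 ≤ PySem.Int.band x ((2:Int) ^ n - 1) := by
  have h2 : (0:Int) ≤ 2 ^ n - 1 := by
    have : (0:Int) < 2 ^ n := by positivity
    omega
  unfold PySem.Int.band
  by_cases hx : 0 ≤ x
  · rw [if_pos hx, if_pos h2]; exact Int.natCast_nonneg _
  · rw [if_neg hx, if_pos h2]; exact Int.natCast_nonneg _

lemma cast_pow_toNat (n : Nat) : ((2:Int) ^ n).toNat = 2 ^ n := by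
  rw [show (2:Int) ^ n = ((2 ^ n : Nat) : Int) by push_cast; ring]
  exact Int.toNat_natCast _

lemma cast_pow_sub_one_toNat (n : Nat) : ((2:Int) ^ n - 1).toNat = 2 ^ n - 1 := by
  have h : (2:Int) ^ n = ((2 ^ n : Nat) : Int) := by push_cast; ring
  have h1 : (1:Nat) ≤ 2 ^ n := Nat.one_le_two_pow
  omega

lemma band_mask_lt (x : Int) (n : Nat) : (PySem.Int.band x ((2:Int) ^ n - 1)).toNat < 2 ^ n := by
  have h2 : (0:Int) ≤ 2 ^ n - 1 := by
    have : (0:Int) < 2 ^ n := by positivity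
    omega
  have h1 : (1:Nat) ≤ 2 ^ n := Nat.one_le_two_pow
  unfold PySem.Int.band
  by_cases hx : 0 ≤ x
  · rw [if_pos hx, if_pos h2, Int.toNat_natCast, cast_pow_sub_one_toNat,
        Nat.and_two_pow_sub_one_eq_mod]
    exact Nat.mod_lt _ (by positivity)
  · rw [if_neg hx, if_pos h2, Int.toNat_natCast, cast_pow_sub_one_toNat]
    have := Nat.sub_le (2 ^ n - 1) ((2 ^ n - 1) &&& (-x - 1).toNat)
    omega

-- the bit A's loop tests equals the corresponding bit of B's masked key
lemma band_bit (x : Int) (n j : Nat) (hj : j < n) :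
    (PySem.Int.band ((2:Int) ^ j) x ≠ 0)
      ↔ (PySem.Int.band x ((2:Int) ^ n - 1)).toNat.testBit j = true := by
  have h2j : (0:Int) ≤ 2 ^ j := by positivity
  have h2n : (0:Int) ≤ 2 ^ n - 1 := by
    have : (0:Int) < 2 ^ n := by positivity
    omega
  unfold PySem.Int.band
  by_cases hx : 0 ≤ x
  · rw [if_pos h2j, if_pos hx, if_pos hx, if_pos h2n, cast_pow_toNat,
        cast_pow_sub_one_toNat, Int.toNat_natCast,
        Nat.two_pow_and, Nat.and_two_pow_sub_one_eq_mod, Nat.testBit_mod_two_pow]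
    have hpos : 0 < 2 ^ j := Nat.two_pow_pos j
    cases hbit : x.toNat.testBit j <;> simp [hbit, hj] <;> omega
  · rw [if_pos h2j, if_neg hx, if_neg hx, if_pos h2n, cast_pow_toNat,
        cast_pow_sub_one_toNat, Int.toNat_natCast,
        Nat.two_pow_and, Nat.land_comm (2 ^ n - 1) ((-x - 1).toNat),
        Nat.and_two_pow_sub_one_eq_mod]
    rw [show (2 ^ n - 1 - (-x - 1).toNat % 2 ^ n) = (2 ^ n - 1 - ((-x - 1).toNat % 2 ^ n)) from rfl]
    rw [compl_testBit j n ((-x - 1).toNat % 2 ^ n)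
        (Nat.mod_lt _ (Nat.two_pow_pos n)) hj,
        Nat.testBit_mod_two_pow]
    have hpos : 0 < 2 ^ j := Nat.two_pow_pos j
    cases hbit : (-x - 1).toNat.testBit j <;> simp [hbit, hj] <;> omega

-- A's loop, characterized elementwise
lemma foldA (theKey : Int) : ∀ (fuel : Nat) (b a : Int) (ss : List Char), 0 ≤ a → (b - a).toNat ≤ fuel →
    (((PySem.List.pyRange a b 1).foldl
        (fun ss i => if PySem.Int.band ((2:Int) ^ i.toNat) theKey ≠ 0
          then ss.set i.toNat '*' else ss) ss).length = ss.length ∧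
     ∀ j : Nat, j < ss.length →
       (((PySem.List.pyRange a b 1).foldl
          (fun ss i => if PySem.Int.band ((2:Int) ^ i.toNat) theKey ≠ 0
            then ss.set i.toNat '*' else ss) ss))[j]? =
         if a ≤ (j:Int) ∧ (j:Int) < b ∧ PySem.Int.band ((2:Int) ^ j) theKey ≠ 0
         then some '*' else ss[j]?) := by
  intro fuel
  induction fuel with
  | zero =>
    intro b a ss ha hf
    have hba : b ≤ a := by omega
    rw [PySem.List.pyRange_one_eq_nil hba]
    refine ⟨rfl, fun j hj => ?_⟩
    rw [if_neg]
    · rfl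
    · rintro ⟨h1, h2, -⟩; omega
  | succ f ih =>
    intro b a ss ha hf
    by_cases hab : b ≤ a
    · rw [PySem.List.pyRange_one_eq_nil hab]
      refine ⟨rfl, fun j hj => ?_⟩
      rw [if_neg]
      · rfl
      · rintro ⟨h1, h2, -⟩; omega
    · push_neg at hab
      rw [PySem.List.pyRange_one_cons hab, List.foldl_cons]
      set ss' := (if PySem.Int.band ((2:Int) ^ a.toNat) theKey ≠ 0
          then ss.set a.toNat '*' else ss) with hss'def
      have hlen' : ss'.length = ss.length := by
        rw [hss'def]; split <;> simp
      obtain ⟨ihlen, ihget⟩ := ih b (a + 1) ss' (by omega) (by omega)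
      refine ⟨ihlen.trans hlen', fun j hj => ?_⟩
      have hj' : j < ss'.length := by omega
      rw [ihget j hj']
      by_cases hcj : (a + 1) ≤ (j:Int)
      · have hne : ¬ (a.toNat = j) := by omega
        have hss'j : ss'[j]? = ss[j]? := by
          rw [hss'def]; split
          · rw [List.getElem?_set, if_neg hne]
          · rfl
        by_cases hrest : ((j:Int) < b ∧ PySem.Int.band ((2:Int) ^ j) theKey ≠ 0)
        · rw [if_pos ⟨hcj, hrest⟩, if_pos ⟨by omega, hrest⟩]
        · rw [if_neg (by tauto), if_neg (by rintro ⟨-, h⟩; exact hrest h), hss'j]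
      · rw [if_neg (by rintro ⟨h1, -⟩; exact hcj h1)]
        by_cases hja : (j:Int) = a
        · have hjt : a.toNat = j := by omega
          have hjb : (j:Int) < b := by omega
          by_cases hc : PySem.Int.band ((2:Int) ^ j) theKey ≠ 0
          · rw [if_pos ⟨by omega, hjb, hc⟩, hss'def, hjt, if_pos hc,
                List.getElem?_set, if_pos rfl, if_pos hj]
          · rw [if_neg (by rintro ⟨-, -, h⟩; exact hc h), hss'def, hjt, if_neg hc]
        · have hlt : (j:Int) < a := by omega
          rw [if_neg (by rintro ⟨h1, -, -⟩; omega)]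
          rw [hss'def]; split
          · rw [List.getElem?_set, if_neg (by omega)]
          · rfl

lemma listA_eq (theKey nTax : Int) :
    (PySem.List.pyRange 0 nTax 1).foldl
        (fun ss i => if PySem.Int.band ((2:Int) ^ i.toNat) theKey ≠ 0
          then ss.set i.toNat '*' else ss) (List.replicate nTax.toNat '.')
      = List.ofFn (fun i : Fin nTax.toNat =>
          if (PySem.Int.band theKey ((2:Int) ^ nTax.toNat - 1)).toNat.testBit i
          then '*' else '.') := by
  obtain ⟨hlen, hget⟩ := foldA theKey (nTax - 0).toNat nTax 0
      (List.replicate nTax.toNat '.') le_rfl le_rfl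
  apply List.ext_getElem?
  intro j
  by_cases hj : j < nTax.toNat
  · rw [hget j (by simpa using hj), List.getElem?_ofFn, dif_pos hj,
        List.getElem?_replicate, if_pos hj]
    have hb := band_bit theKey nTax.toNat j hj
    by_cases hc : PySem.Int.band ((2:Int) ^ j) theKey ≠ 0
    · rw [if_pos ⟨by omega, by omega, hc⟩, hb.mp hc]
      rfl
    · rw [if_neg (by rintro ⟨-, -, h⟩; exact hc h)]
      have : ¬ ((PySem.Int.band theKey ((2:Int) ^ nTax.toNat - 1)).toNat.testBit j = true) :=
        fun h => hc (hb.mpr h)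
      simp only [Bool.not_eq_true] at this
      rw [this]
      rfl
  · have h1 : (List.ofFn (fun i : Fin nTax.toNat =>
        if (PySem.Int.band theKey ((2:Int) ^ nTax.toNat - 1)).toNat.testBit i
        then '*' else '.'))[j]? = none := by
      rw [List.getElem?_ofFn, dif_neg hj]
    rw [h1, List.getElem?_eq_none]
    rw [hlen]
    simpa using hj

lemma listB_eq (theKey nTax : Int) (h : 0 < nTax) :
    ((PySem.Chars.zfill
        (PySem.Int.toBinChars (PySem.Int.band theKey (((1:Int) <<< nTax.toNat) - 1))) nTax).reverse).map pvTr
      = List.ofFn (fun i : Fin nTax.toNat =>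
          if (PySem.Int.band theKey ((2:Int) ^ nTax.toNat - 1)).toNat.testBit i
          then '*' else '.') := by
  rw [show (((1:Int) <<< nTax.toNat) - 1) = ((2:Int) ^ nTax.toNat - 1) by
    rw [Int.shiftLeft_eq, one_mul]]
  set n := nTax.toNat with hn
  set kI := PySem.Int.band theKey ((2:Int) ^ n - 1) with hkI
  have hk0 : 0 ≤ kI := band_mask_nonneg theKey n
  have hklt : kI.toNat < 2 ^ n := band_mask_lt theKey n
  have hbin : PySem.Int.toBinChars kI = (bitsLSB kI.toNat).reverse := by
    unfold PySem.Int.toBinChars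
    rw [if_neg (by omega), toDigits_two]
  rw [hbin]
  rcases hrev : (bitsLSB kI.toNat).reverse with _ | ⟨c, rest⟩
  · exact absurd (List.reverse_eq_nil_iff.mp hrev) (bitsLSB_ne_nil _)
  · have hcmem : c ∈ bitsLSB kI.toNat := by
      rw [← List.mem_reverse, hrev]; simp
    have hcd := bitsLSB_mem kI.toNat c hcmem
    have hc0 : c ≠ '+' := by rcases hcd with h | h <;> subst h <;> decide
    have hc1 : c ≠ '-' := by rcases hcd with h | h <;> subst h <;> decide
    rw [zfill_no_sign c rest nTax hc0 hc1, List.reverse_append, List.reverse_replicate,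
        ← hrev, List.reverse_reverse, List.length_reverse]
    have hnpos : 0 < n := by omega
    exact bits_pad n kI.toNat hnpos hklt

theorem lists_eq (theKey nTax : Int) :
    (PySem.List.pyRange 0 nTax 1).foldl
        (fun ss i => if PySem.Int.band ((2:Int) ^ i.toNat) theKey ≠ 0
          then ss.set i.toNat '*' else ss) (List.replicate nTax.toNat '.')
      = (if nTax ≤ 0 then ([] : List Char)
         else ((PySem.Chars.zfill
            (PySem.Int.toBinChars (PySem.Int.band theKey (((1:Int) <<< nTax.toNat) - 1))) nTax).reverse).map pvTr) := by
  by_cases h : nTax ≤ 0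
  · rw [if_pos h, PySem.List.pyRange_one_eq_nil h]
    have : nTax.toNat = 0 := by omega
    rw [this]
    rfl
  · rw [if_neg h, listA_eq, listB_eq theKey nTax (by omega)]

-- ===== VERDICT (by name: the statement is the Claim_ definition above) =====
theorem getSplitStringFromKey_spec : Claim_equal_getSplitStringFromKey := by
  intro theKey nTax escaped _
  unfold Spec_getSplitStringFromKey
  simp only [getSplitStringFromKey, getSplitStringFromKey_alt]
  rw [lists_eq]
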